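-- pv_equiv track=rewrite | github.com/morganb27/advent-of-code-2015-python | 03/Day03.py | robot_santa
-- ===== SOURCE A (Python) =====
-- directions = {
--     '^': [0, 1],
--     '>': [1, 0],
--     'v': [0, -1],
--     '<': [-1, 0]
-- }
--
-- def robot_santa(data):
--     santa = [0, 0]
--     robot = [0, 0]
--     visited = set()
--     for i in range(len(data)):
--         x, y = directions[data[i]]
--         if i % 2 == 0:
--             santa[0] += x
--             santa[1] += y
--             visited.add(f"{santa[0], santa[1]}")
--         elif i % 2 != 0:
--             robot[0] += x
--             robot[1] += y
--             visited.add(f"{robot[0], robot[1]}")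
--     return len(visited)
-- ===== SOURCE B (Python) =====
-- DELTAS = {'^': (0, 1), '>': (1, 0), 'v': (0, -1), '<': (-1, 0)}
--
-- def robot_santa(data):
--     visited = set()
--     for moves in (data[0::2], data[1::2]):
--         x, y = 0, 0
--         for c in moves:
--             dx, dy = DELTAS[c]
--             x, y = x + dx, y + dy
--             visited.add((x, y))
--     return len(visited)
-- ===== Notes on version B (the rewrite author's own statement) =====
-- stated objective: simpler
-- what changed: Instead of one indexed loop that alternates agents by i%2 and keys the set with f-strings, B slices the input by index parity (data[0::2], data[1::2]) and walks each agent's own move list, adding coordinate tuples to a shared set.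
import Mathlib
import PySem

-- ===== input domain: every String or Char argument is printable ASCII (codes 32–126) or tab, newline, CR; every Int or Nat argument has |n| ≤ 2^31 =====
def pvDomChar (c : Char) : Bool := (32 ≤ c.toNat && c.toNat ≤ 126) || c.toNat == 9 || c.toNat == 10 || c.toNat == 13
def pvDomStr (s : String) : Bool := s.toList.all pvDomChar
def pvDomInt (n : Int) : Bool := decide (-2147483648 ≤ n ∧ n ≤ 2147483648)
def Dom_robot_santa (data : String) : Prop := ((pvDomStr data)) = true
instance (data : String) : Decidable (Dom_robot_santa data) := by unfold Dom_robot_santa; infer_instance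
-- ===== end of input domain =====

-- B replaces A's single indexed loop (agents alternating on i % 2, set keyed by f-strings) with
-- two parity slices data[0::2] / data[1::2], each agent walking its own move list into a shared
-- set of coordinate pairs; same O(n) cost, plainer decomposition.

-- ===== PORT A =====
def pvDirections : PySem.Dict Char (Int × Int) :=
  PySem.Dict.ofList [('^', (0, 1)), ('>', (1, 0)), ('v', (0, -1)), ('<', (-1, 0))]

-- A's loop body for index i; A's set stores the f-string f"{santa[0], santa[1]}", which is
-- injective on integer pairs, so the port stores the pair itself — len(visited) is unchanged.
-- The two .getD defaults are unreachable: i ranges over valid indices of cs, and Pre_ excludes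
-- the characters on which directions[data[i]] raises KeyError.
def pvStepA (cs : List Char) (st : (Int × Int) × (Int × Int) × PySem.Set (Int × Int))
    (i : Int) : (Int × Int) × (Int × Int) × PySem.Set (Int × Int) :=
  let santa := st.1
  let robot := st.2.1
  let visited := st.2.2
  let xy := (PySem.Dict.get? pvDirections ((PySem.List.pyGet? cs i).getD ' ')).getD (0, 0)
  if PySem.Int.mod i 2 = 0 then
    let santa := (santa.1 + xy.1, santa.2 + xy.2)
    (santa, robot, PySem.Set.add visited santa)
  else
    let robot := (robot.1 + xy.1, robot.2 + xy.2)
    (santa, robot, PySem.Set.add visited robot)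

def robot_santa (data : String) : Int :=
  let cs := data.toList
  let st := (PySem.List.pyRange 0 (PySem.List.len cs) 1).foldl (pvStepA cs)
    ((0, 0), (0, 0), PySem.Set.empty)
  PySem.Set.len st.2.2

-- ===== PORT B =====
-- the module-level DELTAS dict of Source B
def pvDeltas : PySem.Dict Char (Int × Int) :=
  PySem.Dict.ofList [('^', (0, 1)), ('>', (1, 0)), ('v', (0, -1)), ('<', (-1, 0))]

-- Source B's inner loop body; .getD (0, 0) is unreachable under Pre_ (DELTAS[c] raises KeyError
-- outside it), and the .getD [] in robot_santa_alt is unreachable (slice? is none only for step 0)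
def pvStepB (st : (Int × Int) × PySem.Set (Int × Int)) (c : Char) :
    (Int × Int) × PySem.Set (Int × Int) :=
  let d := (PySem.Dict.get? pvDeltas c).getD (0, 0)
  let p := (st.1.1 + d.1, st.1.2 + d.2)
  (p, PySem.Set.add st.2 p)

def robot_santa_alt (data : String) : Int :=
  let cs := data.toList
  let visited := [(PySem.List.slice? cs none none 2).getD [],
                  (PySem.List.slice? cs (some 1) none 2).getD []].foldl
    (fun (visited : PySem.Set (Int × Int)) moves =>
      (moves.foldl pvStepB ((0, 0), visited)).2)
    PySem.Set.empty
  PySem.Set.len visited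


-- ===== PRECONDITION & SPEC =====
-- A raises KeyError (directions[data[i]]) on any character other than '^', '>', 'v', '<';
-- Pre_ admits exactly the strings over those four characters.
def Pre_robot_santa (data : String) : Prop :=
  data.toList.all (fun c => c = '^' || c = '>' || c = 'v' || c = '<') = true
instance (data : String) : Decidable (Pre_robot_santa data) := by unfold Pre_robot_santa; infer_instance

def pvWitness_robot_santa : String := "^>v<^^"

def Spec_robot_santa (data : String) (out : Int) : Prop := out = robot_santa_alt data
instance (data : String) (out : Int) : Decidable (Spec_robot_santa data out) := by unfold Spec_robot_santa; infer_instance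

-- ===== CLAIM (what is proved, stated in full; the proofs are below) =====
def Claim_equal_robot_santa : Prop := ∀ (data : String), Dom_robot_santa data → Pre_robot_santa data → Spec_robot_santa data (robot_santa data)

-- ===== LEMMAS AND PROOFS =====

-- one move: position p plus the delta the direction dict assigns to c
def pvMove (p : Int × Int) (c : Char) : Int × Int :=
  let d := (PySem.Dict.get? pvDirections c).getD (0, 0)
  (p.1 + d.1, p.2 + d.2)

def pvMix (s r : Int × Int) : List Char → List (Int × Int)
  | [] => []
  | c :: cs => pvMove s c :: pvMix r (pvMove s c) cs

def pvTrail (p : Int × Int) : List Char → List (Int × Int)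
  | [] => []
  | c :: cs => pvMove p c :: pvTrail (pvMove p c) cs

def pvEvens {α : Type} : List α → List α
  | [] => []
  | [x] => [x]
  | x :: _ :: xs => x :: pvEvens xs

theorem pvEvens_cons {α : Type} (x : α) (xs : List α) :
    pvEvens (x :: xs) = x :: pvEvens xs.tail := by
  cases xs <;> simp [pvEvens]

theorem pvEvens_eq_filterMap {α : Type} (cs : List α) :
    ∀ (c : Nat), cs.length ≤ 2 * c →
      (List.range c).filterMap (fun k => cs[2 * k]?) = pvEvens cs := by
  induction cs using pvEvens.induct with
  | case1 => intro c _; simp [pvEvens]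
  | case2 x =>
    intro c hc
    simp only [List.length_cons, List.length_nil] at hc
    obtain ⟨c', rfl⟩ : ∃ c', c = c' + 1 := ⟨c - 1, by omega⟩
    rw [List.range_succ_eq_map]
    simp [List.filterMap_map, pvEvens]
  | case3 x y xs ih =>
    intro c hc
    simp only [List.length_cons] at hc
    obtain ⟨c', rfl⟩ : ∃ c', c = c' + 1 := ⟨c - 1, by omega⟩
    rw [List.range_succ_eq_map]
    have h2 : ∀ k : Nat, (x :: y :: xs)[2 * (k + 1)]? = xs[2 * k]? := by
      intro k
      have : 2 * (k + 1) = 2 * k + 1 + 1 := by ring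
      rw [this]; rfl
    simp only [List.filterMap_cons, List.filterMap_map, Function.comp_def, Nat.succ_eq_add_one, h2]
    rw [ih c' (by omega)]
    simp [pvEvens]
theorem pvSlice_evens {α : Type} (cs : List α) :
    PySem.List.slice? cs none none 2 = some (pvEvens cs) := by
  simp only [PySem.List.slice?, PySem.List.sliceIndices]
  norm_num
  have hcast : ∀ k : Nat, ((2 : Int) * (k : Int)).toNat = 2 * k := fun k => by omega
  simp only [hcast]
  split
  · rw [pvEvens_eq_filterMap cs _ (by omega)]
  · next h =>
    obtain rfl : cs = [] := by cases cs <;> simp_all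
    simp [pvEvens]

theorem pvSlice_odds {α : Type} (cs : List α) :
    PySem.List.slice? cs (some 1) none 2 = some (pvEvens cs.tail) := by
  simp only [PySem.List.slice?, PySem.List.sliceIndices]
  norm_num
  cases cs with
  | nil => simp [pvEvens]
  | cons a as =>
    have hmin : min (1 : Int) ((a :: as).length : Int) = 1 := by simp
    rw [hmin]
    have hcast : ∀ k : Nat, ((1 : Int) + 2 * (k : Int)).toNat = 2 * k + 1 := fun k => by omega
    simp only [hcast, List.getElem?_cons_succ, List.tail_cons]
    split
    · exact pvEvens_eq_filterMap as _ (by simp only [List.length_cons] at *; omega)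
    · next h =>
      obtain rfl : as = [] := by simp only [List.length_cons] at h; cases as <;> simp_all
      simp [pvEvens]

-- A's loop from index k with state (s, r, V): visited collects the interleaved walk
theorem pvLoopA (cs : List Char) (suf : List Char) :
    ∀ (k : Nat) (s r : Int × Int) (V : PySem.Set (Int × Int)),
      cs.drop k = suf →
      ((PySem.List.pyRange (k : Int) (cs.length : Int) 1).foldl (pvStepA cs) (s, r, V)).2.2 =
        List.foldl PySem.Set.add V (if k % 2 = 0 then pvMix s r suf else pvMix r s suf) := by
  induction suf with
  | nil =>
    intro k s r V h
    have hk : cs.length ≤ k := List.drop_eq_nil_iff.mp h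
    rw [PySem.List.pyRange_one_eq_nil (by exact_mod_cast hk)]
    split <;> simp [pvMix]
  | cons c rest ih =>
    intro k s r V h
    have hk : k < cs.length := by
      by_contra hge
      rw [List.drop_eq_nil_of_le (by omega)] at h
      simp at h
    have hget : cs[k]? = some c := by
      rw [← List.head?_drop, h]; rfl
    have hrest : cs.drop (k + 1) = rest := by
      rw [← List.tail_drop, h, List.tail_cons]
    rw [PySem.List.pyRange_one_cons (by exact_mod_cast hk)]
    rw [List.foldl_cons]
    have hstep : pvStepA cs (s, r, V) (k : Int) =
        if k % 2 = 0 then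
          (pvMove s c, r, PySem.Set.add V (pvMove s c))
        else
          (s, pvMove r c, PySem.Set.add V (pvMove r c)) := by
      have hcond : (PySem.Int.mod (k : Int) 2 = 0) ↔ k % 2 = 0 := by
        rw [PySem.Int.mod_eq_emod_of_pos (by norm_num)]; omega
      simp only [pvStepA, PySem.List.pyGet?_natCast, hget, Option.getD_some, pvMove]
      by_cases hp : k % 2 = 0
      · rw [if_pos (hcond.mpr hp), if_pos hp]
      · rw [if_neg (fun hc => hp (hcond.mp hc)), if_neg hp]
    have hk1 : ((k : Int) + 1) = ((k + 1 : Nat) : Int) := by push_cast; ring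
    rw [hstep, hk1]
    by_cases hp : k % 2 = 0
    · simp only [hp, reduceIte]
      rw [ih (k + 1) (pvMove s c) r (PySem.Set.add V (pvMove s c)) hrest]
      have : (k + 1) % 2 ≠ 0 := by omega
      simp [this, pvMix]
    · simp only [if_neg hp]
      rw [ih (k + 1) s (pvMove r c) (PySem.Set.add V (pvMove r c)) hrest]
      have : (k + 1) % 2 = 0 := by omega
      simp [this, pvMix]

theorem pvLoopB (moves : List Char) :
    ∀ (p : Int × Int) (V : PySem.Set (Int × Int)),
      (moves.foldl pvStepB (p, V)).2 = List.foldl PySem.Set.add V (pvTrail p moves) := by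
  induction moves with
  | nil => intro p V; simp [pvTrail]
  | cons c rest ih =>
    intro p V
    have : pvStepB (p, V) c = (pvMove p c, PySem.Set.add V (pvMove p c)) := by
      simp [pvStepB, pvMove, pvDeltas, pvDirections]
    simp only [List.foldl_cons, this, pvTrail]
    exact ih _ _

theorem pvMix_perm (cs : List Char) :
    ∀ s r, (pvMix s r cs).Perm (pvTrail s (pvEvens cs) ++ pvTrail r (pvEvens cs.tail)) := by
  induction cs with
  | nil => intro s r; simp [pvMix, pvTrail, pvEvens]
  | cons c cs ih =>
    intro s r
    rw [pvEvens_cons]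
    simp only [pvMix, pvTrail, List.tail_cons, List.cons_append]
    exact ((ih r (pvMove s c)).trans (List.perm_append_comm)).cons _

theorem pvLen_perm (L1 L2 : List (Int × Int)) (h : L1.Perm L2) :
    (List.foldl PySem.Set.add PySem.Set.empty L1).length =
      (List.foldl PySem.Set.add PySem.Set.empty L2).length := by
  have e1 : List.foldl PySem.Set.add PySem.Set.empty L1 = PySem.Set.ofList L1 :=
    (PySem.Set.ofList_eq_foldl L1).symm
  have e2 : List.foldl PySem.Set.add PySem.Set.empty L2 = PySem.Set.ofList L2 :=
    (PySem.Set.ofList_eq_foldl L2).symm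
  rw [e1, e2]
  refine List.Perm.length_eq ?_
  rw [List.perm_ext_iff_of_nodup (PySem.Set.nodup_ofList L1) (PySem.Set.nodup_ofList L2)]
  intro x
  simp only [PySem.Set.mem_ofList]
  exact ⟨fun hx => h.mem_iff.mp hx, fun hx => h.mem_iff.mpr hx⟩


-- ===== VERDICT (by name: the statement is the Claim_ definition above) =====
theorem robot_santa_spec : Claim_equal_robot_santa := by
  intro data _ _
  unfold Spec_robot_santa
  unfold robot_santa robot_santa_alt
  simp only [PySem.List.len_eq, pvSlice_evens, pvSlice_odds, Option.getD_some,
    List.foldl_cons, List.foldl_nil]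
  have hLA := pvLoopA data.toList data.toList 0 (0, 0) (0, 0) PySem.Set.empty List.drop_zero
  rw [Nat.cast_zero] at hLA
  rw [hLA, pvLoopB, pvLoopB, ← List.foldl_append]
  rw [if_pos (by norm_num : (0 : Nat) % 2 = 0)]
  have h := pvLen_perm _ _ (pvMix_perm data.toList (0, 0) (0, 0))
  simp only [PySem.Set.len]
  exact_mod_cast h
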